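-- pv_equiv track=rewrite | github.com/orenlab/codeclone | codeclone/report/gates/reasons.py | parse_metric_reason_entry
-- ===== SOURCE A (Python) =====
-- def _strip_terminal_period(text: str) -> str:
--     return text[:-1] if text.endswith(".") else text
--
-- def _parse_two_part_metric_detail(
--     text: str,
--     *,
--     prefix: str,
--     right_label: str,
-- ) -> str | None:
--     if not text.startswith(prefix):
--         return None
--     left_part, right_part = text[len(prefix) :].split(", ", maxsplit=1)
--     return (
--         f"{left_part.rsplit('=', maxsplit=1)[1]} "
--         f"({right_label}={right_part.rsplit('=', maxsplit=1)[1]})"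
--     )
--
-- def parse_metric_reason_entry(reason: str) -> tuple[str, str]:
--     trimmed = _strip_terminal_period(reason)
--
--     def tail(prefix: str) -> str:
--         return trimmed[len(prefix) :]
--
--     simple_prefixes: tuple[tuple[str, str], ...] = (
--         ("New high-risk functions vs metrics baseline: ", "new_high_risk_functions"),
--         (
--             "New high-coupling classes vs metrics baseline: ",
--             "new_high_coupling_classes",
--         ),
--         ("New dependency cycles vs metrics baseline: ", "new_dependency_cycles"),
--         ("New dead code items vs metrics baseline: ", "new_dead_code_items"),
--     )
--     for prefix, kind in simple_prefixes:
--         if trimmed.startswith(prefix):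
--             return kind, tail(prefix)
--
--     if trimmed.startswith("Health score regressed vs metrics baseline: delta="):
--         return "health_delta", trimmed.rsplit("=", maxsplit=1)[1]
--     typing_detail = _parse_two_part_metric_detail(
--         trimmed,
--         prefix="Typing coverage regressed vs metrics baseline: ",
--         right_label="returns_delta",
--     )
--     if typing_detail is not None:
--         return "typing_coverage_delta", typing_detail
--     if trimmed.startswith("Docstring coverage regressed vs metrics baseline: delta="):
--         return "docstring_coverage_delta", trimmed.rsplit("=", maxsplit=1)[1]
--     if trimmed.startswith("Public API breaking changes vs metrics baseline: "):
--         return "api_breaking_changes", tail(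
--             "Public API breaking changes vs metrics baseline: "
--         )
--     coverage_detail = _parse_two_part_metric_detail(
--         trimmed,
--         prefix="Coverage hotspots detected: ",
--         right_label="threshold",
--     )
--     if coverage_detail is not None:
--         return "coverage_hotspots", coverage_detail
--
--     if trimmed.startswith("Dependency cycles detected: "):
--         return "dependency_cycles", tail("Dependency cycles detected: ").replace(
--             " cycle(s)", ""
--         )
--
--     if trimmed.startswith("Dead code detected (high confidence): "):
--         return "dead_code_items", tail(
--             "Dead code detected (high confidence): "
--         ).replace(" item(s)", "")
--
--     threshold_prefixes: tuple[tuple[str, str], ...] = (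
--         ("Complexity threshold exceeded: ", "complexity_max"),
--         ("Coupling threshold exceeded: ", "coupling_max"),
--         ("Cohesion threshold exceeded: ", "cohesion_max"),
--         ("Health score below threshold: ", "health_score"),
--         ("Typing coverage below threshold: ", "typing_coverage"),
--         ("Docstring coverage below threshold: ", "docstring_coverage"),
--     )
--     for prefix, kind in threshold_prefixes:
--         threshold_detail = _parse_two_part_metric_detail(
--             trimmed,
--             prefix=prefix,
--             right_label="threshold",
--         )
--         if threshold_detail is not None:
--             return kind, threshold_detail
--
--     return "detail", trimmed
-- ===== SOURCE B (Python) =====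
-- # Re-implementation: split the message once at its first ": " with str.partition and
-- # dispatch on the exact head via a dict lookup (no ordered prefix scanning at all).
--
-- _BY_HEAD = {
--     "New high-risk functions vs metrics baseline": ("new_high_risk_functions", "tail", None),
--     "New high-coupling classes vs metrics baseline": ("new_high_coupling_classes", "tail", None),
--     "New dependency cycles vs metrics baseline": ("new_dependency_cycles", "tail", None),
--     "New dead code items vs metrics baseline": ("new_dead_code_items", "tail", None),
--     "Health score regressed vs metrics baseline": ("health_delta", "delta", None),
--     "Typing coverage regressed vs metrics baseline": ("typing_coverage_delta", "two", "returns_delta"),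
--     "Docstring coverage regressed vs metrics baseline": ("docstring_coverage_delta", "delta", None),
--     "Public API breaking changes vs metrics baseline": ("api_breaking_changes", "tail", None),
--     "Coverage hotspots detected": ("coverage_hotspots", "two", "threshold"),
--     "Dependency cycles detected": ("dependency_cycles", "strip", " cycle(s)"),
--     "Dead code detected (high confidence)": ("dead_code_items", "strip", " item(s)"),
--     "Complexity threshold exceeded": ("complexity_max", "two", "threshold"),
--     "Coupling threshold exceeded": ("coupling_max", "two", "threshold"),
--     "Cohesion threshold exceeded": ("cohesion_max", "two", "threshold"),
--     "Health score below threshold": ("health_score", "two", "threshold"),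
--     "Typing coverage below threshold": ("typing_coverage", "two", "threshold"),
--     "Docstring coverage below threshold": ("docstring_coverage", "two", "threshold"),
-- }
--
--
-- def parse_metric_reason_entry(reason: str) -> tuple[str, str]:
--     trimmed = reason[:-1] if reason.endswith(".") else reason
--     head, sep, tail = trimmed.partition(": ")
--     entry = _BY_HEAD.get(head) if sep else None
--     if entry is None:
--         return "detail", trimmed
--     kind, mode, extra = entry
--     if mode == "tail":
--         return kind, tail
--     if mode == "delta":
--         if not tail.startswith("delta="):
--             return "detail", trimmed
--         return kind, trimmed.rpartition("=")[2]
--     if mode == "strip":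
--         return kind, tail.replace(extra, "")
--     left, _, right = tail.partition(", ")
--     return kind, f"{left.rpartition('=')[2]} ({extra}={right.rpartition('=')[2]})"
-- ===== Notes on version B (the rewrite author's own statement) =====
-- stated objective: alternative
-- what changed: Instead of A's ordered ladder of 17 startswith tests (two of them inner loops), B splits the trimmed string once at its first ': ' with str.partition and dispatches on the exact head through a single dict lookup, then applies one of four small extractors; correctness rests on no head containing ': ', so the first ': ' always sits right after a matching head.
import Mathlib
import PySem

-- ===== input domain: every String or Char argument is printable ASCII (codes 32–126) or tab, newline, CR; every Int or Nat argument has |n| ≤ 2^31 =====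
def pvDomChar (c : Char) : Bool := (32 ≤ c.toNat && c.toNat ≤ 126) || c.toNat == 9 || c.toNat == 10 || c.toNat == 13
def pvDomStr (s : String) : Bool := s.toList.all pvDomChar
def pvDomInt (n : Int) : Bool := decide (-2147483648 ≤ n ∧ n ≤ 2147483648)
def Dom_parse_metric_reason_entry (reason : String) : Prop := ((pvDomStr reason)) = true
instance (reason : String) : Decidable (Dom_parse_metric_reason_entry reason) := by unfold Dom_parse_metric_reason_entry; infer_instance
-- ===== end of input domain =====

-- B replaces A's ordered ladder of 17 prefix tests by ONE partition of the string at its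
-- first ": " and a dict lookup on the exact head; same results, no prefix scanning.

-- ===== PORT A =====
-- _strip_terminal_period: text[:-1] if text.endswith(".") else text
def pvStripTerminalPeriod (text : List Char) : List Char :=
  if PySem.Chars.endswith text ['.'] then PySem.List.slice text none (some (-1)) else text

-- s.rsplit("=", maxsplit=1)[1]: everything after the LAST '=' (exact via rfind).
-- When s has no '=' Python raises IndexError — those inputs are excluded by Pre_; we return s there.
def pvLastEqField (s : List Char) : List Char :=
  let i := PySem.Chars.rfind s ['=']
  if i < 0 then s else s.drop (i.toNat + 1)

-- left_part, right_part = s.split(", ", maxsplit=1): split at the FIRST occurrence of ", "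
-- (exact via find). Python raises ValueError when ", " is absent (one piece only) — those
-- inputs are excluded by Pre_; we return (s, []) there.
def pvSplit2 (s : List Char) : List Char × List Char :=
  let i := PySem.Chars.find s [',', ' ']
  if i < 0 then (s, []) else (s.take i.toNat, s.drop (i.toNat + 2))

-- _parse_two_part_metric_detail
def pvTwoPartMetricDetail (text prefx rightLabel : List Char) : Option (List Char) :=
  if PySem.Chars.startswith text prefx then
    let parts := pvSplit2 (PySem.List.slice text (some (prefx.length : Int)) none)
    some (pvLastEqField parts.1 ++ [' ', '('] ++ rightLabel ++ ['='] ++ pvLastEqField parts.2 ++ [')'])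
  else
    none

-- the local tuple 'simple_prefixes'
def pvSimplePrefixes : List (String × String) :=
  [("New high-risk functions vs metrics baseline: ", "new_high_risk_functions"),
   ("New high-coupling classes vs metrics baseline: ", "new_high_coupling_classes"),
   ("New dependency cycles vs metrics baseline: ", "new_dependency_cycles"),
   ("New dead code items vs metrics baseline: ", "new_dead_code_items")]

-- the local tuple 'threshold_prefixes'
def pvThresholdPrefixes : List (String × String) :=
  [("Complexity threshold exceeded: ", "complexity_max"),
   ("Coupling threshold exceeded: ", "coupling_max"),
   ("Cohesion threshold exceeded: ", "cohesion_max"),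
   ("Health score below threshold: ", "health_score"),
   ("Typing coverage below threshold: ", "typing_coverage"),
   ("Docstring coverage below threshold: ", "docstring_coverage")]

-- 'for prefix, kind in simple_prefixes: if trimmed.startswith(prefix): return kind, tail(prefix)'
def pvSimpleLoop (t : List Char) : List (String × String) → Option (String × String)
  | [] => none
  | (p, k) :: rest =>
      if PySem.Chars.startswith t p.toList then
        some (k, String.ofList (PySem.List.slice t (some (p.toList.length : Int)) none))
      else pvSimpleLoop t rest

-- 'for prefix, kind in threshold_prefixes: … if threshold_detail is not None: return kind, threshold_detail'
def pvThresholdLoop (t : List Char) : List (String × String) → Option (String × String)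
  | [] => none
  | (p, k) :: rest =>
      match pvTwoPartMetricDetail t p.toList "threshold".toList with
      | some d => some (k, String.ofList d)
      | none => pvThresholdLoop t rest

-- the body of parse_metric_reason_entry after 'trimmed = _strip_terminal_period(reason)'
def pvACore (t : List Char) : String × String :=
  match pvSimpleLoop t pvSimplePrefixes with
  | some r => r
  | none =>
    if PySem.Chars.startswith t "Health score regressed vs metrics baseline: delta=".toList then
      ("health_delta", String.ofList (pvLastEqField t))
    else
      match pvTwoPartMetricDetail t "Typing coverage regressed vs metrics baseline: ".toList
          "returns_delta".toList with
      | some d => ("typing_coverage_delta", String.ofList d)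
      | none =>
        if PySem.Chars.startswith t "Docstring coverage regressed vs metrics baseline: delta=".toList then
          ("docstring_coverage_delta", String.ofList (pvLastEqField t))
        else if PySem.Chars.startswith t "Public API breaking changes vs metrics baseline: ".toList then
          ("api_breaking_changes",
           String.ofList (PySem.List.slice t
             (some (("Public API breaking changes vs metrics baseline: ".toList.length : Int))) none))
        else
          match pvTwoPartMetricDetail t "Coverage hotspots detected: ".toList "threshold".toList with
          | some d => ("coverage_hotspots", String.ofList d)
          | none =>
            if PySem.Chars.startswith t "Dependency cycles detected: ".toList then
              ("dependency_cycles",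
               String.ofList (PySem.Chars.replace
                 (PySem.List.slice t (some (("Dependency cycles detected: ".toList.length : Int))) none)
                 " cycle(s)".toList []))
            else if PySem.Chars.startswith t "Dead code detected (high confidence): ".toList then
              ("dead_code_items",
               String.ofList (PySem.Chars.replace
                 (PySem.List.slice t (some (("Dead code detected (high confidence): ".toList.length : Int))) none)
                 " item(s)".toList []))
            else
              match pvThresholdLoop t pvThresholdPrefixes with
              | some r => r
              | none => ("detail", String.ofList t)

def parse_metric_reason_entry (reason : String) : String × String :=
  pvACore (pvStripTerminalPeriod reason.toList)

-- ===== PORT B =====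
-- the (mode, extra) part of a _BY_HEAD entry
inductive PvMode where
  | tail
  | delta
  | strip (suffix : String)
  | two (label : String)
deriving DecidableEq, Repr

-- the module constant _BY_HEAD
def pvByHead : PySem.Dict String (String × PvMode) := ⟨
  [("New high-risk functions vs metrics baseline", ("new_high_risk_functions", .tail)),
   ("New high-coupling classes vs metrics baseline", ("new_high_coupling_classes", .tail)),
   ("New dependency cycles vs metrics baseline", ("new_dependency_cycles", .tail)),
   ("New dead code items vs metrics baseline", ("new_dead_code_items", .tail)),
   ("Health score regressed vs metrics baseline", ("health_delta", .delta)),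
   ("Typing coverage regressed vs metrics baseline", ("typing_coverage_delta", .two "returns_delta")),
   ("Docstring coverage regressed vs metrics baseline", ("docstring_coverage_delta", .delta)),
   ("Public API breaking changes vs metrics baseline", ("api_breaking_changes", .tail)),
   ("Coverage hotspots detected", ("coverage_hotspots", .two "threshold")),
   ("Dependency cycles detected", ("dependency_cycles", .strip " cycle(s)")),
   ("Dead code detected (high confidence)", ("dead_code_items", .strip " item(s)")),
   ("Complexity threshold exceeded", ("complexity_max", .two "threshold")),
   ("Coupling threshold exceeded", ("coupling_max", .two "threshold")),
   ("Cohesion threshold exceeded", ("cohesion_max", .two "threshold")),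
   ("Health score below threshold", ("health_score", .two "threshold")),
   ("Typing coverage below threshold", ("typing_coverage", .two "threshold")),
   ("Docstring coverage below threshold", ("docstring_coverage", .two "threshold"))]⟩

-- head, sep, tail = s.partition(sep): split at the FIRST occurrence of sep (exact via find;
-- (s, '', '') when absent)
def pvPartition (s sep : List Char) : List Char × List Char × List Char :=
  let i := PySem.Chars.find s sep
  if i < 0 then (s, [], []) else (s.take i.toNat, sep, s.drop (i.toNat + sep.length))

-- s.rpartition("=")[2]: everything after the LAST '=' (exact via rfind; s itself when absent)
def pvRPart2 (s : List Char) : List Char :=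
  let i := PySem.Chars.rfind s ['=']
  if i < 0 then s else s.drop (i.toNat + 1)

-- the body after 'entry' matched: the four extractor modes
def pvApplyMode (kind : String) (mode : PvMode) (t tl : List Char) : String × String :=
  match mode with
  | .tail => (kind, String.ofList tl)
  | .delta =>
      if PySem.Chars.startswith tl "delta=".toList then (kind, String.ofList (pvRPart2 t))
      else ("detail", String.ofList t)
  | .strip suf => (kind, String.ofList (PySem.Chars.replace tl suf.toList []))
  | .two label =>
      let q := pvPartition tl [',', ' ']
      (kind, String.ofList (pvRPart2 q.1 ++ [' ', '('] ++ label.toList ++ ['='] ++ pvRPart2 q.2.2 ++ [')']))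

-- the body of B's parse_metric_reason_entry after trimming
def pvAltCore (t : List Char) : String × String :=
  let p := pvPartition t [':', ' ']
  match (if p.2.1 = [] then none else PySem.Dict.get? pvByHead (String.ofList p.1)) with
  | none => ("detail", String.ofList t)
  | some (kind, mode) => pvApplyMode kind mode t p.2.2

def parse_metric_reason_entry_alt (reason : String) : String × String :=
  pvAltCore (if PySem.Chars.endswith reason.toList ['.']
             then PySem.List.slice reason.toList none (some (-1)) else reason.toList)

-- ===== PRECONDITION & SPEC =====
-- Pre_ excludes exactly the inputs on which A raises: a matching two-part prefix whose tail has
-- no ", " (ValueError from tuple unpacking) or whose left/right piece has no '=' (IndexError from rsplit(...)[1]).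
def Pre_parse_metric_reason_entry (reason : String) : Prop :=
  let t := if PySem.Chars.endswith reason.toList ['.'] then reason.toList.dropLast else reason.toList
  ∀ p ∈ ["Typing coverage regressed vs metrics baseline: ",
         "Coverage hotspots detected: ",
         "Complexity threshold exceeded: ",
         "Coupling threshold exceeded: ",
         "Cohesion threshold exceeded: ",
         "Health score below threshold: ",
         "Typing coverage below threshold: ",
         "Docstring coverage below threshold: "],
    PySem.Chars.startswith t p.toList = true →
      (let rest := t.drop p.toList.length
       let i := PySem.Chars.find rest [',', ' ']
       0 ≤ i ∧ PySem.Chars.isIn ['='] (rest.take i.toNat) = true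
            ∧ PySem.Chars.isIn ['='] (rest.drop (i.toNat + 2)) = true)
instance (reason : String) : Decidable (Pre_parse_metric_reason_entry reason) := by
  unfold Pre_parse_metric_reason_entry; infer_instance

def pvWitness_parse_metric_reason_entry : String :=
  "Complexity threshold exceeded: max=12, threshold=10."

def Spec_parse_metric_reason_entry (reason : String) (out : String × String) : Prop := out = parse_metric_reason_entry_alt reason
instance (reason : String) (out : String × String) : Decidable (Spec_parse_metric_reason_entry reason out) := by unfold Spec_parse_metric_reason_entry; infer_instance

-- ===== CLAIM (what is proved, stated in full; the proofs are below) =====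
def Claim_equal_parse_metric_reason_entry : Prop := ∀ (reason : String), Dom_parse_metric_reason_entry reason → Pre_parse_metric_reason_entry reason → Spec_parse_metric_reason_entry reason (parse_metric_reason_entry reason)

-- ===== LEMMAS AND PROOFS =====
-- first occurrence of ": " in h ++ ": " ++ r is at h.length, when h itself contains no ": "
theorem pv_find_head (h r : List Char) (hh : PySem.Chars.isIn [':', ' '] h = false) :
    PySem.Chars.find (h ++ ':' :: ' ' :: r) [':', ' '] = (h.length : Int) := by
  set t := h ++ ':' :: ' ' :: r with ht
  have hinf : [':', ' '] <:+: t := ⟨h, r, by simp [ht]⟩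
  have hnn : 0 ≤ PySem.Chars.find t [':', ' '] := (PySem.Chars.find_nonneg_iff _ _).2 hinf
  obtain ⟨hpre, hmin⟩ := PySem.Chars.find_spec hnn
  set i := (PySem.Chars.find t [':', ' ']).toNat with hi
  have hdropH : t.drop h.length = ':' :: ' ' :: r := by
    rw [ht]; exact List.drop_left ..
  have hle : i ≤ h.length := by
    by_contra hgt
    exact hmin h.length (Nat.lt_of_not_le hgt) (by rw [hdropH]; exact ⟨r, rfl⟩)
  have hieq : i = h.length := by
    rcases lt_or_eq_of_le hle with hlt | heq
    · exfalso
      have hd : t.drop i = h.drop i ++ ':' :: ' ' :: r := by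
        rw [ht]; exact List.drop_append_of_le_length (le_of_lt hlt)
      rw [hd] at hpre
      cases hc : h.drop i with
      | nil =>
        have := List.drop_eq_nil_iff.mp hc
        omega
      | cons a as =>
        cases as with
        | nil =>
          rw [hc] at hpre
          simp [List.cons_prefix_cons] at hpre
        | cons b bs =>
          rw [hc] at hpre
          simp only [List.cons_append, List.cons_prefix_cons] at hpre
          obtain ⟨ha, hb, _⟩ := hpre
          have : [':', ' '] <+: h.drop i := by
            rw [hc, ha, hb]; exact ⟨bs, rfl⟩
          have : PySem.Chars.isIn [':', ' '] h = true :=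
            (PySem.Chars.exists_prefix_drop_iff_isIn _ _).1 ⟨i, this⟩
          rw [hh] at this; exact Bool.noConfusion this
    · exact heq
  have hcast := Int.toNat_of_nonneg hnn
  rw [← hcast, ← hi, hieq]

-- partition of h ++ ": " ++ r at ": ", when h contains no ": "
theorem pvPartition_match (h r : List Char) (hh : PySem.Chars.isIn [':', ' '] h = false) :
    pvPartition (h ++ ':' :: ' ' :: r) [':', ' '] = (h, [':', ' '], r) := by
  unfold pvPartition
  rw [pv_find_head h r hh]
  have h0 : ¬ ((h.length : Int) < 0) := by omega
  simp only [if_neg h0, Int.toNat_natCast, List.length_cons, List.length_nil]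
  refine congrArg₂ _ ?_ (congrArg _ ?_)
  · exact List.take_left ..
  · have : h ++ ':' :: ' ' :: r = (h ++ [':', ' ']) ++ r := by simp
    rw [this]
    have hl : (h ++ [':', ' ']).length = h.length + 2 := by simp
    rw [← hl]
    simp

-- a string whose first ": " is at i decomposes as take i ++ ": " ++ drop (i+2)
theorem pv_reconstruct (t : List Char) (i : Nat)
    (hfind : PySem.Chars.find t [':', ' '] = (i : Int)) :
    t = t.take i ++ ':' :: ' ' :: t.drop (i + 2) := by
  have hnn : 0 ≤ PySem.Chars.find t [':', ' '] := by rw [hfind]; omega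
  obtain ⟨hpre, -⟩ := PySem.Chars.find_spec hnn
  rw [hfind] at hpre
  simp only [Int.toNat_natCast] at hpre
  obtain ⟨u, hu⟩ := hpre
  have hdrop2 : t.drop (i + 2) = u := by
    have : t.drop (i + 2) = (t.drop i).drop 2 := by rw [List.drop_drop, Nat.add_comm]
    rw [this, ← hu]
    rfl
  rw [hdrop2]
  conv_lhs => rw [← List.take_append_drop i t]
  rw [← hu]
  rfl

-- A's rsplit("=",1)[1] surrogate and B's rpartition("=")[2] are the same extraction
theorem pvLastEq_eq_rpart : pvLastEqField = pvRPart2 := rfl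

-- A's split(", ",1) surrogate computes the two outer pieces of B's partition at ", "
theorem pvSplit2_eq (s : List Char) :
    pvSplit2 s = ((pvPartition s [',', ' ']).1, (pvPartition s [',', ' ']).2.2) := by
  unfold pvSplit2 pvPartition
  by_cases h : PySem.Chars.find s [',', ' '] < 0 <;> simp [h]

-- slicing off a literal prefix is dropping it
theorem pv_slice_tail (P r : List Char) :
    PySem.List.slice (P ++ r) (some (P.length : Int)) none = r := by
  rw [PySem.List.slice_from _ (by omega)]
  simp

-- B on a string whose head (before the first ": ") is hd: one dict lookup, then the mode
theorem pvAltCore_match (hd : String) (r : List Char)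
    (hh : PySem.Chars.isIn [':', ' '] hd.toList = false) :
    pvAltCore (hd.toList ++ ':' :: ' ' :: r) =
      match PySem.Dict.get? pvByHead hd with
      | none => ("detail", String.ofList (hd.toList ++ ':' :: ' ' :: r))
      | some (kind, mode) => pvApplyMode kind mode (hd.toList ++ ':' :: ' ' :: r) r := by
  unfold pvAltCore
  rw [pvPartition_match _ _ hh]
  simp [String.ofList_toList]
-- when none of A's 17 prefixes matches, B also falls through to ('detail', trimmed)
set_option maxHeartbeats 2000000 in
-- when none of A's 17 prefixes matches, B also falls through to ('detail', trimmed)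
theorem pvAltCore_detail (t : List Char)
    (h1 : PySem.Chars.startswith t "New high-risk functions vs metrics baseline: ".toList = false)
    (h2 : PySem.Chars.startswith t "New high-coupling classes vs metrics baseline: ".toList = false)
    (h3 : PySem.Chars.startswith t "New dependency cycles vs metrics baseline: ".toList = false)
    (h4 : PySem.Chars.startswith t "New dead code items vs metrics baseline: ".toList = false)
    (h5 : PySem.Chars.startswith t "Health score regressed vs metrics baseline: delta=".toList = false)
    (h6 : PySem.Chars.startswith t "Typing coverage regressed vs metrics baseline: ".toList = false)
    (h7 : PySem.Chars.startswith t "Docstring coverage regressed vs metrics baseline: delta=".toList = false)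
    (h8 : PySem.Chars.startswith t "Public API breaking changes vs metrics baseline: ".toList = false)
    (h9 : PySem.Chars.startswith t "Coverage hotspots detected: ".toList = false)
    (h10 : PySem.Chars.startswith t "Dependency cycles detected: ".toList = false)
    (h11 : PySem.Chars.startswith t "Dead code detected (high confidence): ".toList = false)
    (h12 : PySem.Chars.startswith t "Complexity threshold exceeded: ".toList = false)
    (h13 : PySem.Chars.startswith t "Coupling threshold exceeded: ".toList = false)
    (h14 : PySem.Chars.startswith t "Cohesion threshold exceeded: ".toList = false)
    (h15 : PySem.Chars.startswith t "Health score below threshold: ".toList = false)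
    (h16 : PySem.Chars.startswith t "Typing coverage below threshold: ".toList = false)
    (h17 : PySem.Chars.startswith t "Docstring coverage below threshold: ".toList = false)
    : pvAltCore t = ("detail", String.ofList t) := by
  by_cases hneg : PySem.Chars.find t [':', ' '] < 0
  · simp [pvAltCore, pvPartition, hneg]
  · have hnn : 0 ≤ PySem.Chars.find t [':', ' '] := not_lt.mp hneg
    have hfind : PySem.Chars.find t [':', ' '] = ((PySem.Chars.find t [':', ' ']).toNat : Int) :=
      (Int.toNat_of_nonneg hnn).symm
    set i := (PySem.Chars.find t [':', ' ']).toNat with hidef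
    have hre := pv_reconstruct t i hfind
    have hpart : pvPartition t [':', ' '] = (t.take i, [':', ' '], t.drop (i + 2)) := by
      unfold pvPartition
      rw [if_neg hneg, ← hidef]
      rfl
    simp only [pvAltCore, hpart]
    rw [if_neg (by simp : ¬([':', ' '] = ([] : List Char)))]
    cases hget : PySem.Dict.get? pvByHead (String.ofList (t.take i)) with
    | none => rfl
    | some kv =>
      obtain ⟨⟨k', v⟩, hfq, hv⟩ := Option.map_eq_some_iff.mp hget
      have hb := List.find?_some hfq
      have hkey : k' = String.ofList (t.take i) := eq_of_beq hb
      have htake : t.take i = k'.toList := by rw [hkey, String.toList_ofList]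
      rw [htake] at hre
      have hmem := List.mem_of_find?_eq_some hfq
      simp only [pvByHead, List.mem_cons, List.not_mem_nil, or_false] at hmem
      subst hv
      rcases hmem with h|h|h|h|h|h|h|h|h|h|h|h|h|h|h|h|h
      · injection h with hk _
        rw [hk] at hre
        exfalso
        have hsw : PySem.Chars.startswith t "New high-risk functions vs metrics baseline: ".toList = true := by
          rw [PySem.Chars.startswith_iff]
          refine ⟨t.drop (i + 2), ?_⟩
          rw [show ("New high-risk functions vs metrics baseline: ".toList : List Char) = "New high-risk functions vs metrics baseline".toList ++ [':', ' '] from rfl,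
            List.append_assoc]
          exact hre.symm
        rw [hsw] at h1
        exact Bool.noConfusion h1
      · injection h with hk _
        rw [hk] at hre
        exfalso
        have hsw : PySem.Chars.startswith t "New high-coupling classes vs metrics baseline: ".toList = true := by
          rw [PySem.Chars.startswith_iff]
          refine ⟨t.drop (i + 2), ?_⟩
          rw [show ("New high-coupling classes vs metrics baseline: ".toList : List Char) = "New high-coupling classes vs metrics baseline".toList ++ [':', ' '] from rfl,
            List.append_assoc]
          exact hre.symm
        rw [hsw] at h2
        exact Bool.noConfusion h2
      · injection h with hk _
        rw [hk] at hre
        exfalso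
        have hsw : PySem.Chars.startswith t "New dependency cycles vs metrics baseline: ".toList = true := by
          rw [PySem.Chars.startswith_iff]
          refine ⟨t.drop (i + 2), ?_⟩
          rw [show ("New dependency cycles vs metrics baseline: ".toList : List Char) = "New dependency cycles vs metrics baseline".toList ++ [':', ' '] from rfl,
            List.append_assoc]
          exact hre.symm
        rw [hsw] at h3
        exact Bool.noConfusion h3
      · injection h with hk _
        rw [hk] at hre
        exfalso
        have hsw : PySem.Chars.startswith t "New dead code items vs metrics baseline: ".toList = true := by
          rw [PySem.Chars.startswith_iff]
          refine ⟨t.drop (i + 2), ?_⟩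
          rw [show ("New dead code items vs metrics baseline: ".toList : List Char) = "New dead code items vs metrics baseline".toList ++ [':', ' '] from rfl,
            List.append_assoc]
          exact hre.symm
        rw [hsw] at h4
        exact Bool.noConfusion h4
      · injection h with hk hv2
        rw [hk] at hre
        simp only [hv2]
        by_cases hsw : PySem.Chars.startswith (t.drop (i + 2)) "delta=".toList = true
        · exfalso
          obtain ⟨r', hr'⟩ := (PySem.Chars.startswith_iff _ _).1 hsw
          have hswt : PySem.Chars.startswith t "Health score regressed vs metrics baseline: delta=".toList = true := by
            rw [PySem.Chars.startswith_iff]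
            refine ⟨r', ?_⟩
            conv_rhs => rw [hre, ← hr']
            rw [show ("Health score regressed vs metrics baseline: delta=".toList : List Char) = "Health score regressed vs metrics baseline".toList ++ ':' :: ' ' :: "delta=".toList from rfl]
            simp
          rw [hswt] at h5
          exact Bool.noConfusion h5
        · simp only [Bool.not_eq_true] at hsw
          rw [show ("delta=".toList : List Char) = ['d', 'e', 'l', 't', 'a', '='] from rfl] at hsw
          simp [pvApplyMode, hsw]
      · injection h with hk _
        rw [hk] at hre
        exfalso
        have hsw : PySem.Chars.startswith t "Typing coverage regressed vs metrics baseline: ".toList = true := by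
          rw [PySem.Chars.startswith_iff]
          refine ⟨t.drop (i + 2), ?_⟩
          rw [show ("Typing coverage regressed vs metrics baseline: ".toList : List Char) = "Typing coverage regressed vs metrics baseline".toList ++ [':', ' '] from rfl,
            List.append_assoc]
          exact hre.symm
        rw [hsw] at h6
        exact Bool.noConfusion h6
      · injection h with hk hv2
        rw [hk] at hre
        simp only [hv2]
        by_cases hsw : PySem.Chars.startswith (t.drop (i + 2)) "delta=".toList = true
        · exfalso
          obtain ⟨r', hr'⟩ := (PySem.Chars.startswith_iff _ _).1 hsw
          have hswt : PySem.Chars.startswith t "Docstring coverage regressed vs metrics baseline: delta=".toList = true := by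
            rw [PySem.Chars.startswith_iff]
            refine ⟨r', ?_⟩
            conv_rhs => rw [hre, ← hr']
            rw [show ("Docstring coverage regressed vs metrics baseline: delta=".toList : List Char) = "Docstring coverage regressed vs metrics baseline".toList ++ ':' :: ' ' :: "delta=".toList from rfl]
            simp
          rw [hswt] at h7
          exact Bool.noConfusion h7
        · simp only [Bool.not_eq_true] at hsw
          rw [show ("delta=".toList : List Char) = ['d', 'e', 'l', 't', 'a', '='] from rfl] at hsw
          simp [pvApplyMode, hsw]
      · injection h with hk _
        rw [hk] at hre
        exfalso
        have hsw : PySem.Chars.startswith t "Public API breaking changes vs metrics baseline: ".toList = true := by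
          rw [PySem.Chars.startswith_iff]
          refine ⟨t.drop (i + 2), ?_⟩
          rw [show ("Public API breaking changes vs metrics baseline: ".toList : List Char) = "Public API breaking changes vs metrics baseline".toList ++ [':', ' '] from rfl,
            List.append_assoc]
          exact hre.symm
        rw [hsw] at h8
        exact Bool.noConfusion h8
      · injection h with hk _
        rw [hk] at hre
        exfalso
        have hsw : PySem.Chars.startswith t "Coverage hotspots detected: ".toList = true := by
          rw [PySem.Chars.startswith_iff]
          refine ⟨t.drop (i + 2), ?_⟩
          rw [show ("Coverage hotspots detected: ".toList : List Char) = "Coverage hotspots detected".toList ++ [':', ' '] from rfl,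
            List.append_assoc]
          exact hre.symm
        rw [hsw] at h9
        exact Bool.noConfusion h9
      · injection h with hk _
        rw [hk] at hre
        exfalso
        have hsw : PySem.Chars.startswith t "Dependency cycles detected: ".toList = true := by
          rw [PySem.Chars.startswith_iff]
          refine ⟨t.drop (i + 2), ?_⟩
          rw [show ("Dependency cycles detected: ".toList : List Char) = "Dependency cycles detected".toList ++ [':', ' '] from rfl,
            List.append_assoc]
          exact hre.symm
        rw [hsw] at h10
        exact Bool.noConfusion h10
      · injection h with hk _
        rw [hk] at hre
        exfalso
        have hsw : PySem.Chars.startswith t "Dead code detected (high confidence): ".toList = true := by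
          rw [PySem.Chars.startswith_iff]
          refine ⟨t.drop (i + 2), ?_⟩
          rw [show ("Dead code detected (high confidence): ".toList : List Char) = "Dead code detected (high confidence)".toList ++ [':', ' '] from rfl,
            List.append_assoc]
          exact hre.symm
        rw [hsw] at h11
        exact Bool.noConfusion h11
      · injection h with hk _
        rw [hk] at hre
        exfalso
        have hsw : PySem.Chars.startswith t "Complexity threshold exceeded: ".toList = true := by
          rw [PySem.Chars.startswith_iff]
          refine ⟨t.drop (i + 2), ?_⟩
          rw [show ("Complexity threshold exceeded: ".toList : List Char) = "Complexity threshold exceeded".toList ++ [':', ' '] from rfl,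
            List.append_assoc]
          exact hre.symm
        rw [hsw] at h12
        exact Bool.noConfusion h12
      · injection h with hk _
        rw [hk] at hre
        exfalso
        have hsw : PySem.Chars.startswith t "Coupling threshold exceeded: ".toList = true := by
          rw [PySem.Chars.startswith_iff]
          refine ⟨t.drop (i + 2), ?_⟩
          rw [show ("Coupling threshold exceeded: ".toList : List Char) = "Coupling threshold exceeded".toList ++ [':', ' '] from rfl,
            List.append_assoc]
          exact hre.symm
        rw [hsw] at h13
        exact Bool.noConfusion h13
      · injection h with hk _
        rw [hk] at hre
        exfalso
        have hsw : PySem.Chars.startswith t "Cohesion threshold exceeded: ".toList = true := by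
          rw [PySem.Chars.startswith_iff]
          refine ⟨t.drop (i + 2), ?_⟩
          rw [show ("Cohesion threshold exceeded: ".toList : List Char) = "Cohesion threshold exceeded".toList ++ [':', ' '] from rfl,
            List.append_assoc]
          exact hre.symm
        rw [hsw] at h14
        exact Bool.noConfusion h14
      · injection h with hk _
        rw [hk] at hre
        exfalso
        have hsw : PySem.Chars.startswith t "Health score below threshold: ".toList = true := by
          rw [PySem.Chars.startswith_iff]
          refine ⟨t.drop (i + 2), ?_⟩
          rw [show ("Health score below threshold: ".toList : List Char) = "Health score below threshold".toList ++ [':', ' '] from rfl,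
            List.append_assoc]
          exact hre.symm
        rw [hsw] at h15
        exact Bool.noConfusion h15
      · injection h with hk _
        rw [hk] at hre
        exfalso
        have hsw : PySem.Chars.startswith t "Typing coverage below threshold: ".toList = true := by
          rw [PySem.Chars.startswith_iff]
          refine ⟨t.drop (i + 2), ?_⟩
          rw [show ("Typing coverage below threshold: ".toList : List Char) = "Typing coverage below threshold".toList ++ [':', ' '] from rfl,
            List.append_assoc]
          exact hre.symm
        rw [hsw] at h16
        exact Bool.noConfusion h16
      · injection h with hk _
        rw [hk] at hre
        exfalso
        have hsw : PySem.Chars.startswith t "Docstring coverage below threshold: ".toList = true := by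
          rw [PySem.Chars.startswith_iff]
          refine ⟨t.drop (i + 2), ?_⟩
          rw [show ("Docstring coverage below threshold: ".toList : List Char) = "Docstring coverage below threshold".toList ++ [':', ' '] from rfl,
            List.append_assoc]
          exact hre.symm
        rw [hsw] at h17
        exact Bool.noConfusion h17
set_option maxHeartbeats 2000000 in
theorem pvCore_eq (t : List Char) : pvACore t = pvAltCore t := by
  by_cases h1 : PySem.Chars.startswith t "New high-risk functions vs metrics baseline: ".toList = true
  · simp only [pvACore, pvSimplePrefixes, pvSimpleLoop, pvThresholdPrefixes, pvThresholdLoop, pvTwoPartMetricDetail, h1, Bool.false_eq_true, if_false, if_true]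
    obtain ⟨r, hr⟩ := (PySem.Chars.startswith_iff _ _).1 h1
    rw [← hr]
    rw [pv_slice_tail]
    rw [show "New high-risk functions vs metrics baseline: ".toList ++ r = "New high-risk functions vs metrics baseline".toList ++ ':' :: ' ' :: r from by rw [show "New high-risk functions vs metrics baseline: ".toList = "New high-risk functions vs metrics baseline".toList ++ [':', ' '] from rfl]; simp]
    rw [pvAltCore_match "New high-risk functions vs metrics baseline" r (by decide), show PySem.Dict.get? pvByHead "New high-risk functions vs metrics baseline" = some ("new_high_risk_functions", PvMode.tail) from rfl]
    rfl
  simp only [Bool.not_eq_true] at h1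
  by_cases h2 : PySem.Chars.startswith t "New high-coupling classes vs metrics baseline: ".toList = true
  · simp only [pvACore, pvSimplePrefixes, pvSimpleLoop, pvThresholdPrefixes, pvThresholdLoop, pvTwoPartMetricDetail, h1, h2, Bool.false_eq_true, if_false, if_true]
    obtain ⟨r, hr⟩ := (PySem.Chars.startswith_iff _ _).1 h2
    rw [← hr]
    rw [pv_slice_tail]
    rw [show "New high-coupling classes vs metrics baseline: ".toList ++ r = "New high-coupling classes vs metrics baseline".toList ++ ':' :: ' ' :: r from by rw [show "New high-coupling classes vs metrics baseline: ".toList = "New high-coupling classes vs metrics baseline".toList ++ [':', ' '] from rfl]; simp]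
    rw [pvAltCore_match "New high-coupling classes vs metrics baseline" r (by decide), show PySem.Dict.get? pvByHead "New high-coupling classes vs metrics baseline" = some ("new_high_coupling_classes", PvMode.tail) from rfl]
    rfl
  simp only [Bool.not_eq_true] at h2
  by_cases h3 : PySem.Chars.startswith t "New dependency cycles vs metrics baseline: ".toList = true
  · simp only [pvACore, pvSimplePrefixes, pvSimpleLoop, pvThresholdPrefixes, pvThresholdLoop, pvTwoPartMetricDetail, h1, h2, h3, Bool.false_eq_true, if_false, if_true]
    obtain ⟨r, hr⟩ := (PySem.Chars.startswith_iff _ _).1 h3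
    rw [← hr]
    rw [pv_slice_tail]
    rw [show "New dependency cycles vs metrics baseline: ".toList ++ r = "New dependency cycles vs metrics baseline".toList ++ ':' :: ' ' :: r from by rw [show "New dependency cycles vs metrics baseline: ".toList = "New dependency cycles vs metrics baseline".toList ++ [':', ' '] from rfl]; simp]
    rw [pvAltCore_match "New dependency cycles vs metrics baseline" r (by decide), show PySem.Dict.get? pvByHead "New dependency cycles vs metrics baseline" = some ("new_dependency_cycles", PvMode.tail) from rfl]
    rfl
  simp only [Bool.not_eq_true] at h3
  by_cases h4 : PySem.Chars.startswith t "New dead code items vs metrics baseline: ".toList = true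
  · simp only [pvACore, pvSimplePrefixes, pvSimpleLoop, pvThresholdPrefixes, pvThresholdLoop, pvTwoPartMetricDetail, h1, h2, h3, h4, Bool.false_eq_true, if_false, if_true]
    obtain ⟨r, hr⟩ := (PySem.Chars.startswith_iff _ _).1 h4
    rw [← hr]
    rw [pv_slice_tail]
    rw [show "New dead code items vs metrics baseline: ".toList ++ r = "New dead code items vs metrics baseline".toList ++ ':' :: ' ' :: r from by rw [show "New dead code items vs metrics baseline: ".toList = "New dead code items vs metrics baseline".toList ++ [':', ' '] from rfl]; simp]
    rw [pvAltCore_match "New dead code items vs metrics baseline" r (by decide), show PySem.Dict.get? pvByHead "New dead code items vs metrics baseline" = some ("new_dead_code_items", PvMode.tail) from rfl]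
    rfl
  simp only [Bool.not_eq_true] at h4
  by_cases h5 : PySem.Chars.startswith t "Health score regressed vs metrics baseline: delta=".toList = true
  · simp only [pvACore, pvSimplePrefixes, pvSimpleLoop, pvThresholdPrefixes, pvThresholdLoop, pvTwoPartMetricDetail, h1, h2, h3, h4, h5, Bool.false_eq_true, if_false, if_true]
    obtain ⟨r, hr⟩ := (PySem.Chars.startswith_iff _ _).1 h5
    rw [← hr]
    rw [show "Health score regressed vs metrics baseline: delta=".toList ++ r = "Health score regressed vs metrics baseline".toList ++ ':' :: ' ' :: ("delta=".toList ++ r) from by rw [show "Health score regressed vs metrics baseline: delta=".toList = "Health score regressed vs metrics baseline".toList ++ ':' :: ' ' :: "delta=".toList from rfl]; simp]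
    rw [pvAltCore_match "Health score regressed vs metrics baseline" _ (by decide), show PySem.Dict.get? pvByHead "Health score regressed vs metrics baseline" = some ("health_delta", PvMode.delta) from rfl]
    have hsw : PySem.Chars.startswith ("delta=".toList ++ r) "delta=".toList = true := (PySem.Chars.startswith_iff _ _).2 ⟨r, rfl⟩
    simp only [pvApplyMode, hsw, if_true, pvLastEq_eq_rpart]
  simp only [Bool.not_eq_true] at h5
  by_cases h6 : PySem.Chars.startswith t "Typing coverage regressed vs metrics baseline: ".toList = true
  · simp only [pvACore, pvSimplePrefixes, pvSimpleLoop, pvThresholdPrefixes, pvThresholdLoop, pvTwoPartMetricDetail, h1, h2, h3, h4, h5, h6, Bool.false_eq_true, if_false, if_true]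
    obtain ⟨r, hr⟩ := (PySem.Chars.startswith_iff _ _).1 h6
    rw [← hr]
    rw [pv_slice_tail]
    rw [show "Typing coverage regressed vs metrics baseline: ".toList ++ r = "Typing coverage regressed vs metrics baseline".toList ++ ':' :: ' ' :: r from by rw [show "Typing coverage regressed vs metrics baseline: ".toList = "Typing coverage regressed vs metrics baseline".toList ++ [':', ' '] from rfl]; simp]
    rw [pvAltCore_match "Typing coverage regressed vs metrics baseline" r (by decide), show PySem.Dict.get? pvByHead "Typing coverage regressed vs metrics baseline" = some ("typing_coverage_delta", PvMode.two "returns_delta") from rfl]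
    simp only [pvApplyMode, pvSplit2_eq, pvLastEq_eq_rpart]
  simp only [Bool.not_eq_true] at h6
  by_cases h7 : PySem.Chars.startswith t "Docstring coverage regressed vs metrics baseline: delta=".toList = true
  · simp only [pvACore, pvSimplePrefixes, pvSimpleLoop, pvThresholdPrefixes, pvThresholdLoop, pvTwoPartMetricDetail, h1, h2, h3, h4, h5, h6, h7, Bool.false_eq_true, if_false, if_true]
    obtain ⟨r, hr⟩ := (PySem.Chars.startswith_iff _ _).1 h7
    rw [← hr]
    rw [show "Docstring coverage regressed vs metrics baseline: delta=".toList ++ r = "Docstring coverage regressed vs metrics baseline".toList ++ ':' :: ' ' :: ("delta=".toList ++ r) from by rw [show "Docstring coverage regressed vs metrics baseline: delta=".toList = "Docstring coverage regressed vs metrics baseline".toList ++ ':' :: ' ' :: "delta=".toList from rfl]; simp]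
    rw [pvAltCore_match "Docstring coverage regressed vs metrics baseline" _ (by decide), show PySem.Dict.get? pvByHead "Docstring coverage regressed vs metrics baseline" = some ("docstring_coverage_delta", PvMode.delta) from rfl]
    have hsw : PySem.Chars.startswith ("delta=".toList ++ r) "delta=".toList = true := (PySem.Chars.startswith_iff _ _).2 ⟨r, rfl⟩
    simp only [pvApplyMode, hsw, if_true, pvLastEq_eq_rpart]
  simp only [Bool.not_eq_true] at h7
  by_cases h8 : PySem.Chars.startswith t "Public API breaking changes vs metrics baseline: ".toList = true
  · simp only [pvACore, pvSimplePrefixes, pvSimpleLoop, pvThresholdPrefixes, pvThresholdLoop, pvTwoPartMetricDetail, h1, h2, h3, h4, h5, h6, h7, h8, Bool.false_eq_true, if_false, if_true]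
    obtain ⟨r, hr⟩ := (PySem.Chars.startswith_iff _ _).1 h8
    rw [← hr]
    rw [pv_slice_tail]
    rw [show "Public API breaking changes vs metrics baseline: ".toList ++ r = "Public API breaking changes vs metrics baseline".toList ++ ':' :: ' ' :: r from by rw [show "Public API breaking changes vs metrics baseline: ".toList = "Public API breaking changes vs metrics baseline".toList ++ [':', ' '] from rfl]; simp]
    rw [pvAltCore_match "Public API breaking changes vs metrics baseline" r (by decide), show PySem.Dict.get? pvByHead "Public API breaking changes vs metrics baseline" = some ("api_breaking_changes", PvMode.tail) from rfl]
    rfl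
  simp only [Bool.not_eq_true] at h8
  by_cases h9 : PySem.Chars.startswith t "Coverage hotspots detected: ".toList = true
  · simp only [pvACore, pvSimplePrefixes, pvSimpleLoop, pvThresholdPrefixes, pvThresholdLoop, pvTwoPartMetricDetail, h1, h2, h3, h4, h5, h6, h7, h8, h9, Bool.false_eq_true, if_false, if_true]
    obtain ⟨r, hr⟩ := (PySem.Chars.startswith_iff _ _).1 h9
    rw [← hr]
    rw [pv_slice_tail]
    rw [show "Coverage hotspots detected: ".toList ++ r = "Coverage hotspots detected".toList ++ ':' :: ' ' :: r from by rw [show "Coverage hotspots detected: ".toList = "Coverage hotspots detected".toList ++ [':', ' '] from rfl]; simp]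
    rw [pvAltCore_match "Coverage hotspots detected" r (by decide), show PySem.Dict.get? pvByHead "Coverage hotspots detected" = some ("coverage_hotspots", PvMode.two "threshold") from rfl]
    simp only [pvApplyMode, pvSplit2_eq, pvLastEq_eq_rpart]
  simp only [Bool.not_eq_true] at h9
  by_cases h10 : PySem.Chars.startswith t "Dependency cycles detected: ".toList = true
  · simp only [pvACore, pvSimplePrefixes, pvSimpleLoop, pvThresholdPrefixes, pvThresholdLoop, pvTwoPartMetricDetail, h1, h2, h3, h4, h5, h6, h7, h8, h9, h10, Bool.false_eq_true, if_false, if_true]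
    obtain ⟨r, hr⟩ := (PySem.Chars.startswith_iff _ _).1 h10
    rw [← hr]
    rw [pv_slice_tail]
    rw [show "Dependency cycles detected: ".toList ++ r = "Dependency cycles detected".toList ++ ':' :: ' ' :: r from by rw [show "Dependency cycles detected: ".toList = "Dependency cycles detected".toList ++ [':', ' '] from rfl]; simp]
    rw [pvAltCore_match "Dependency cycles detected" r (by decide), show PySem.Dict.get? pvByHead "Dependency cycles detected" = some ("dependency_cycles", PvMode.strip " cycle(s)") from rfl]
    rfl
  simp only [Bool.not_eq_true] at h10
  by_cases h11 : PySem.Chars.startswith t "Dead code detected (high confidence): ".toList = true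
  · simp only [pvACore, pvSimplePrefixes, pvSimpleLoop, pvThresholdPrefixes, pvThresholdLoop, pvTwoPartMetricDetail, h1, h2, h3, h4, h5, h6, h7, h8, h9, h10, h11, Bool.false_eq_true, if_false, if_true]
    obtain ⟨r, hr⟩ := (PySem.Chars.startswith_iff _ _).1 h11
    rw [← hr]
    rw [pv_slice_tail]
    rw [show "Dead code detected (high confidence): ".toList ++ r = "Dead code detected (high confidence)".toList ++ ':' :: ' ' :: r from by rw [show "Dead code detected (high confidence): ".toList = "Dead code detected (high confidence)".toList ++ [':', ' '] from rfl]; simp]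
    rw [pvAltCore_match "Dead code detected (high confidence)" r (by decide), show PySem.Dict.get? pvByHead "Dead code detected (high confidence)" = some ("dead_code_items", PvMode.strip " item(s)") from rfl]
    rfl
  simp only [Bool.not_eq_true] at h11
  by_cases h12 : PySem.Chars.startswith t "Complexity threshold exceeded: ".toList = true
  · simp only [pvACore, pvSimplePrefixes, pvSimpleLoop, pvThresholdPrefixes, pvThresholdLoop, pvTwoPartMetricDetail, h1, h2, h3, h4, h5, h6, h7, h8, h9, h10, h11, h12, Bool.false_eq_true, if_false, if_true]
    obtain ⟨r, hr⟩ := (PySem.Chars.startswith_iff _ _).1 h12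
    rw [← hr]
    rw [pv_slice_tail]
    rw [show "Complexity threshold exceeded: ".toList ++ r = "Complexity threshold exceeded".toList ++ ':' :: ' ' :: r from by rw [show "Complexity threshold exceeded: ".toList = "Complexity threshold exceeded".toList ++ [':', ' '] from rfl]; simp]
    rw [pvAltCore_match "Complexity threshold exceeded" r (by decide), show PySem.Dict.get? pvByHead "Complexity threshold exceeded" = some ("complexity_max", PvMode.two "threshold") from rfl]
    simp only [pvApplyMode, pvSplit2_eq, pvLastEq_eq_rpart]
  simp only [Bool.not_eq_true] at h12
  by_cases h13 : PySem.Chars.startswith t "Coupling threshold exceeded: ".toList = true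
  · simp only [pvACore, pvSimplePrefixes, pvSimpleLoop, pvThresholdPrefixes, pvThresholdLoop, pvTwoPartMetricDetail, h1, h2, h3, h4, h5, h6, h7, h8, h9, h10, h11, h12, h13, Bool.false_eq_true, if_false, if_true]
    obtain ⟨r, hr⟩ := (PySem.Chars.startswith_iff _ _).1 h13
    rw [← hr]
    rw [pv_slice_tail]
    rw [show "Coupling threshold exceeded: ".toList ++ r = "Coupling threshold exceeded".toList ++ ':' :: ' ' :: r from by rw [show "Coupling threshold exceeded: ".toList = "Coupling threshold exceeded".toList ++ [':', ' '] from rfl]; simp]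
    rw [pvAltCore_match "Coupling threshold exceeded" r (by decide), show PySem.Dict.get? pvByHead "Coupling threshold exceeded" = some ("coupling_max", PvMode.two "threshold") from rfl]
    simp only [pvApplyMode, pvSplit2_eq, pvLastEq_eq_rpart]
  simp only [Bool.not_eq_true] at h13
  by_cases h14 : PySem.Chars.startswith t "Cohesion threshold exceeded: ".toList = true
  · simp only [pvACore, pvSimplePrefixes, pvSimpleLoop, pvThresholdPrefixes, pvThresholdLoop, pvTwoPartMetricDetail, h1, h2, h3, h4, h5, h6, h7, h8, h9, h10, h11, h12, h13, h14, Bool.false_eq_true, if_false, if_true]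
    obtain ⟨r, hr⟩ := (PySem.Chars.startswith_iff _ _).1 h14
    rw [← hr]
    rw [pv_slice_tail]
    rw [show "Cohesion threshold exceeded: ".toList ++ r = "Cohesion threshold exceeded".toList ++ ':' :: ' ' :: r from by rw [show "Cohesion threshold exceeded: ".toList = "Cohesion threshold exceeded".toList ++ [':', ' '] from rfl]; simp]
    rw [pvAltCore_match "Cohesion threshold exceeded" r (by decide), show PySem.Dict.get? pvByHead "Cohesion threshold exceeded" = some ("cohesion_max", PvMode.two "threshold") from rfl]
    simp only [pvApplyMode, pvSplit2_eq, pvLastEq_eq_rpart]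
  simp only [Bool.not_eq_true] at h14
  by_cases h15 : PySem.Chars.startswith t "Health score below threshold: ".toList = true
  · simp only [pvACore, pvSimplePrefixes, pvSimpleLoop, pvThresholdPrefixes, pvThresholdLoop, pvTwoPartMetricDetail, h1, h2, h3, h4, h5, h6, h7, h8, h9, h10, h11, h12, h13, h14, h15, Bool.false_eq_true, if_false, if_true]
    obtain ⟨r, hr⟩ := (PySem.Chars.startswith_iff _ _).1 h15
    rw [← hr]
    rw [pv_slice_tail]
    rw [show "Health score below threshold: ".toList ++ r = "Health score below threshold".toList ++ ':' :: ' ' :: r from by rw [show "Health score below threshold: ".toList = "Health score below threshold".toList ++ [':', ' '] from rfl]; simp]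
    rw [pvAltCore_match "Health score below threshold" r (by decide), show PySem.Dict.get? pvByHead "Health score below threshold" = some ("health_score", PvMode.two "threshold") from rfl]
    simp only [pvApplyMode, pvSplit2_eq, pvLastEq_eq_rpart]
  simp only [Bool.not_eq_true] at h15
  by_cases h16 : PySem.Chars.startswith t "Typing coverage below threshold: ".toList = true
  · simp only [pvACore, pvSimplePrefixes, pvSimpleLoop, pvThresholdPrefixes, pvThresholdLoop, pvTwoPartMetricDetail, h1, h2, h3, h4, h5, h6, h7, h8, h9, h10, h11, h12, h13, h14, h15, h16, Bool.false_eq_true, if_false, if_true]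
    obtain ⟨r, hr⟩ := (PySem.Chars.startswith_iff _ _).1 h16
    rw [← hr]
    rw [pv_slice_tail]
    rw [show "Typing coverage below threshold: ".toList ++ r = "Typing coverage below threshold".toList ++ ':' :: ' ' :: r from by rw [show "Typing coverage below threshold: ".toList = "Typing coverage below threshold".toList ++ [':', ' '] from rfl]; simp]
    rw [pvAltCore_match "Typing coverage below threshold" r (by decide), show PySem.Dict.get? pvByHead "Typing coverage below threshold" = some ("typing_coverage", PvMode.two "threshold") from rfl]
    simp only [pvApplyMode, pvSplit2_eq, pvLastEq_eq_rpart]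
  simp only [Bool.not_eq_true] at h16
  by_cases h17 : PySem.Chars.startswith t "Docstring coverage below threshold: ".toList = true
  · simp only [pvACore, pvSimplePrefixes, pvSimpleLoop, pvThresholdPrefixes, pvThresholdLoop, pvTwoPartMetricDetail, h1, h2, h3, h4, h5, h6, h7, h8, h9, h10, h11, h12, h13, h14, h15, h16, h17, Bool.false_eq_true, if_false, if_true]
    obtain ⟨r, hr⟩ := (PySem.Chars.startswith_iff _ _).1 h17
    rw [← hr]
    rw [pv_slice_tail]
    rw [show "Docstring coverage below threshold: ".toList ++ r = "Docstring coverage below threshold".toList ++ ':' :: ' ' :: r from by rw [show "Docstring coverage below threshold: ".toList = "Docstring coverage below threshold".toList ++ [':', ' '] from rfl]; simp]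
    rw [pvAltCore_match "Docstring coverage below threshold" r (by decide), show PySem.Dict.get? pvByHead "Docstring coverage below threshold" = some ("docstring_coverage", PvMode.two "threshold") from rfl]
    simp only [pvApplyMode, pvSplit2_eq, pvLastEq_eq_rpart]
  simp only [Bool.not_eq_true] at h17
  simp only [pvACore, pvSimplePrefixes, pvSimpleLoop, pvThresholdPrefixes, pvThresholdLoop, pvTwoPartMetricDetail, h1, h2, h3, h4, h5, h6, h7, h8, h9, h10, h11, h12, h13, h14, h15, h16, h17, Bool.false_eq_true, if_false, if_true]
  exact (pvAltCore_detail t h1 h2 h3 h4 h5 h6 h7 h8 h9 h10 h11 h12 h13 h14 h15 h16 h17).symm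

-- ===== VERDICT (by name: the statement is the Claim_ definition above) =====
theorem parse_metric_reason_entry_spec : Claim_equal_parse_metric_reason_entry := by
  intro reason _ _
  unfold Spec_parse_metric_reason_entry parse_metric_reason_entry parse_metric_reason_entry_alt
  exact pvCore_eq _
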